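-- pv_equiv track=rewrite | github.com/ajzaff/arimeval | arimeval/positiondata.py | featencode
-- ===== SOURCE A (Python) =====
-- def fem(f):
--     return '1' if f == 1 else '0'
--
-- b83 = tuple("23456789ABCDEFGHIJKLMNOPQRSTUVWXYZ"
--             "abcdefghijklmnopqrstuvwxyz!#$%&()*+-;<=>?@^_`{|}~")
--
-- def featencode(feats):
--     s = ""
--     i = 0
--     for f in feats:
--         if f == 0:
--             i += 1
--             if i == 83:
--                 s += b83[82]
--                 i = 0
--         else:
--             if i > 0:
--                 s += b83[i - 1]
--                 i = 0
--             s += fem(f)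
--     if i > 0:
--         s += b83[i - 1]
--     return s
-- ===== SOURCE B (Python) =====
-- b83 = tuple("23456789ABCDEFGHIJKLMNOPQRSTUVWXYZ"
--             "abcdefghijklmnopqrstuvwxyz!#$%&()*+-;<=>?@^_`{|}~")
--
-- def featencode(feats):
--     feats = list(feats)
--     n = len(feats)
--     out = []
--     j = 0
--     while j < n:
--         if feats[j] == 0:
--             k = j
--             while k < n and feats[k] == 0:
--                 k += 1
--             full, rem = divmod(k - j, 83)
--             out.append(b83[82] * full)
--             if rem:
--                 out.append(b83[rem - 1])
--             j = k
--         else: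
--             out.append('1' if feats[j] == 1 else '0')
--             j += 1
--     return ''.join(out)
-- ===== Notes on version B (the rewrite author's own statement) =====
-- stated objective: alternative
-- what changed: Replaces A's incremental zero counter that emits a chunk mid-loop whenever it hits 83 by a run-length scan: each maximal zero-run's output is computed in closed form with divmod(L, 83), and pieces are joined at the end.
import Mathlib
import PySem

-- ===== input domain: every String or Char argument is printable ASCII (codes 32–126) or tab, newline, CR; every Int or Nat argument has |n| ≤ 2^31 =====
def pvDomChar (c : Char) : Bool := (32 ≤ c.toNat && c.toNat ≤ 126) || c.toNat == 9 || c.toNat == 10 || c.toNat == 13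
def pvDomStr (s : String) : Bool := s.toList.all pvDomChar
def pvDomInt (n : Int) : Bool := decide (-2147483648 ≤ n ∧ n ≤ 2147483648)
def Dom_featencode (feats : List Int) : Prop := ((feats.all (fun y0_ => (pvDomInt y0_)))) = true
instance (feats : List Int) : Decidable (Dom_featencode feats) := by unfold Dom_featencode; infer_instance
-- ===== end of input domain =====

-- B replaces A's incremental zero counter (emitting mid-loop at i == 83) by a run-length
-- scan with closed-form divmod arithmetic per zero-run; objective: alternative decomposition.

-- shared module constant b83 (as in the Python module) and its indexing b83[k]
def pvB83 : List Char :=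
  ("23456789ABCDEFGHIJKLMNOPQRSTUVWXYZabcdefghijklmnopqrstuvwxyz!#$%&()*+-;<=>?@^_`{|}~").toList
def pvB83at (k : Int) : List Char := (PySem.List.pyGet? pvB83 k).toList

-- ===== PORT A =====
def femA (f : Int) : List Char := if f = 1 then ['1'] else ['0']

def stepA (st : List Char × Int) (f : Int) : List Char × Int :=
  if f = 0 then
    let i := st.2 + 1
    if i = 83 then (st.1 ++ pvB83at 82, 0) else (st.1, i)
  else
    let s := if st.2 > 0 then st.1 ++ pvB83at (st.2 - 1) else st.1
    (s ++ femA f, 0)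

-- trailing flush "if i > 0: s += b83[i-1]"
def flushA (st : List Char × Int) : List Char :=
  if st.2 > 0 then st.1 ++ pvB83at (st.2 - 1) else st.1

def featencode (feats : List Int) : String :=
  String.mk (flushA (feats.foldl stepA ([], 0)))

-- ===== PORT B =====
-- output of one maximal zero-run of length L: full b83[82] chunks, then the remainder digit
def pvRunOut (L : Nat) : List Char :=
  (List.replicate (L / 83) (pvB83at 82)).flatten ++
    (if L % 83 > 0 then pvB83at (((L % 83 : Nat) : Int) - 1) else [])

def encodeRuns : List Int → List Char
  | [] => []
  | f :: rest =>
    if f = 0 then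
      pvRunOut (1 + (rest.takeWhile (fun x => x == 0)).length) ++
        encodeRuns (rest.dropWhile (fun x => x == 0))
    else
      (if f = 1 then ['1'] else ['0']) ++ encodeRuns rest
termination_by feats => feats.length
decreasing_by
  · have := List.length_dropWhile_le (fun x : Int => x == 0) rest
    simp; omega
  · simp

def featencode_alt (feats : List Int) : String := String.mk (encodeRuns feats)

-- ===== PRECONDITION & SPEC =====
def Spec_featencode (feats : List Int) (out : String) : Prop := out = featencode_alt feats
instance (feats : List Int) (out : String) : Decidable (Spec_featencode feats out) := by unfold Spec_featencode; infer_instance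

-- ===== CLAIM (what is proved, stated in full; the proofs are below) =====
def Claim_equal_featencode : Prop := ∀ (feats : List Int), Dom_featencode feats → Spec_featencode feats (featencode feats)

-- ===== LEMMAS AND PROOFS =====

-- proof-side characterisation of A's loop: zenc n feats = what A appends when its counter is n
def zenc : Nat → List Int → List Char
  | n, [] => if n > 0 then pvB83at ((n : Int) - 1) else []
  | n, f :: rest =>
    if f = 0 then
      if n + 1 = 83 then pvB83at 82 ++ zenc 0 rest else zenc (n + 1) rest
    else (if n > 0 then pvB83at ((n : Int) - 1) else []) ++ femA f ++ zenc 0 rest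

theorem foldA_zenc : ∀ (feats : List Int) (s : List Char) (n : Nat), n ≤ 82 →
    flushA (feats.foldl stepA (s, (n : Int))) = s ++ zenc n feats := by
  intro feats
  induction feats with
  | nil =>
    intro s n _
    by_cases h : n > 0 <;> simp [flushA, zenc, h] <;> omega
  | cons f rest ih =>
    intro s n hn
    by_cases hf : f = 0
    · subst hf
      by_cases h82 : n = 82
      · subst h82
        simp only [List.foldl_cons, stepA]
        norm_num
        have h0 := ih (s ++ pvB83at 82) 0 (by omega)
        simp only [Nat.cast_zero] at h0
        rw [h0]
        simp [zenc]
      · have hcond : ¬ ((n : Int) + 1 = 83) := by omega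
        simp only [List.foldl_cons, stepA]
        norm_num [hcond]
        have : (n : Int) + 1 = ((n + 1 : Nat) : Int) := by push_cast; ring
        rw [this, ih s (n + 1) (by omega)]
        simp [zenc, show ¬ (n + 1 = 83) by omega]
    · simp only [List.foldl_cons, stepA, if_neg hf]
      have hcast : ((n : Int) > 0) ↔ (n > 0) := by omega
      have h0 := ih ((if (n : Int) > 0 then s ++ pvB83at ((n : Int) - 1) else s) ++ femA f) 0 (by omega)
      simp only [Nat.cast_zero] at h0
      rw [h0]
      by_cases hpos : n > 0
      · simp [zenc, hf, hpos, hcast.mpr hpos, List.append_assoc]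
      · have : ¬ ((n : Int) > 0) := by omega
        simp [zenc, hf, hpos, this, List.append_assoc]

theorem takeWhile_rep (m : Nat) (xs : List Int) :
    ((List.replicate m (0 : Int) ++ xs).takeWhile (fun x => x == 0)) =
      List.replicate m 0 ++ xs.takeWhile (fun x => x == 0) := by
  induction m with
  | zero => simp
  | succ k ih => simp [List.replicate_succ, List.takeWhile, ih]

theorem dropWhile_rep (m : Nat) (xs : List Int) :
    ((List.replicate m (0 : Int) ++ xs).dropWhile (fun x => x == 0)) =
      xs.dropWhile (fun x => x == 0) := by
  induction m with
  | zero => simp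
  | succ k ih => simp [List.replicate_succ, List.dropWhile, ih]

-- the closing of a 83-long zero block
theorem encodeRuns_83 (xs : List Int) :
    encodeRuns (List.replicate 83 (0 : Int) ++ xs) = pvB83at 82 ++ encodeRuns xs := by
  have h : List.replicate 83 (0 : Int) ++ xs = 0 :: (List.replicate 82 0 ++ xs) := by
    simp [List.replicate_succ]
  rw [h, encodeRuns, if_pos rfl, takeWhile_rep, dropWhile_rep]
  set t := (xs.takeWhile (fun x => x == 0)).length with ht
  have hlen : 1 + (List.replicate 82 (0 : Int) ++ xs.takeWhile (fun x => x == 0)).length = 83 + t := by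
    simp [ht]; omega
  rw [hlen]
  have hdiv : (83 + t) / 83 = 1 + t / 83 := by omega
  have hmod : (83 + t) % 83 = t % 83 := by omega
  rw [pvRunOut, hdiv, hmod]
  cases xs with
  | nil => simp [encodeRuns, pvRunOut, ht, List.replicate_succ]
  | cons x ys =>
    by_cases hx : x = 0
    · subst hx
      rw [show encodeRuns (0 :: ys) = pvRunOut (1 + (ys.takeWhile (fun x => x == 0)).length) ++
            encodeRuns (ys.dropWhile (fun x => x == 0)) from by rw [encodeRuns]; simp]
      have ht' : t = 1 + (ys.takeWhile (fun x => x == 0)).length := by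
        simp [ht, List.takeWhile_cons]; omega
      have hd : (0 :: ys).dropWhile (fun x : Int => x == 0) = ys.dropWhile (fun x => x == 0) := by
        simp [List.dropWhile_cons]
      rw [hd, ← ht', pvRunOut]
      rw [show 1 + t / 83 = t / 83 + 1 from by omega]
      simp [List.replicate_succ, List.append_assoc]
    · have ht0 : t = 0 := by simp [ht, List.takeWhile_cons, hx]
      have hd : (x :: ys).dropWhile (fun x : Int => x == 0) = x :: ys := by
        simp [List.dropWhile_cons, hx]
      rw [hd, ht0]
      simp [List.replicate_succ]

theorem zenc_encodeRuns : ∀ (feats : List Int) (n : Nat), n ≤ 82 →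
    zenc n feats = encodeRuns (List.replicate n (0 : Int) ++ feats) := by
  intro feats
  induction feats with
  | nil =>
    intro n hn
    by_cases hpos : n > 0
    · obtain ⟨m, rfl⟩ : ∃ m, n = m + 1 := ⟨n - 1, by omega⟩
      rw [show List.replicate (m + 1) (0 : Int) ++ [] = 0 :: List.replicate m 0 from by
        simp [List.replicate_succ]]
      rw [encodeRuns, if_pos rfl]
      have htw : (List.replicate m (0 : Int)).takeWhile (fun x => x == 0) = List.replicate m 0 := by
        have := takeWhile_rep m ([] : List Int); simpa using this
      have hdw : (List.replicate m (0 : Int)).dropWhile (fun x => x == 0) = [] := by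
        have := dropWhile_rep m ([] : List Int); simpa using this
      rw [htw, hdw]
      have hdiv : (1 + m) / 83 = 0 := by omega
      have hmod : (1 + m) % 83 = m + 1 := by omega
      simp [zenc, hpos, pvRunOut, hdiv, hmod, encodeRuns]
    · have : n = 0 := by omega
      subst this; simp [zenc, encodeRuns]
  | cons f rest ih =>
    intro n hn
    by_cases hf : f = 0
    · subst hf
      have hsplit : List.replicate n (0 : Int) ++ 0 :: rest = List.replicate (n + 1) 0 ++ rest := by
        simp [List.replicate_succ']
      by_cases h82 : n = 82
      · subst h82
        rw [zenc, if_pos rfl, if_pos rfl, hsplit, encodeRuns_83, ih 0 (by omega)]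
        simp
      · rw [zenc, if_pos rfl, if_neg (by omega), hsplit, ih (n + 1) (by omega)]
    · -- nonzero element closes the pending run of n zeros
      by_cases hpos : n > 0
      · obtain ⟨m, rfl⟩ : ∃ m, n = m + 1 := ⟨n - 1, by omega⟩
        rw [show List.replicate (m + 1) (0 : Int) ++ f :: rest = 0 :: (List.replicate m 0 ++ f :: rest) from by
          simp [List.replicate_succ]]
        rw [encodeRuns, if_pos rfl, takeWhile_rep, dropWhile_rep]
        have htw : (f :: rest).takeWhile (fun x : Int => x == 0) = [] := by
          simp [List.takeWhile_cons, hf]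
        have hdw : (f :: rest).dropWhile (fun x : Int => x == 0) = f :: rest := by
          simp [List.dropWhile_cons, hf]
        rw [htw, hdw]
        have hL : 1 + (List.replicate m (0 : Int) ++ ([] : List Int)).length = m + 1 := by
          simp; omega
        rw [hL]
        rw [show encodeRuns (f :: rest) = (if f = 1 then ['1'] else ['0']) ++ encodeRuns rest from by
          rw [encodeRuns, if_neg hf]]
        simp only [zenc, if_neg hf, if_pos hpos]
        rw [pvRunOut, show (m + 1) / 83 = 0 from by omega, show (m + 1) % 83 = m + 1 from by omega]
        simp [femA, List.append_assoc, ih 0 (by omega)]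
      · have : n = 0 := by omega
        subst this
        simp only [List.replicate_zero, List.nil_append]
        rw [show encodeRuns (f :: rest) = (if f = 1 then ['1'] else ['0']) ++ encodeRuns rest from by
          rw [encodeRuns, if_neg hf]]
        simp only [zenc, if_neg hf]
        simp [femA, ih 0 (by omega)]

-- ===== VERDICT (by name: the statement is the Claim_ definition above) =====
theorem featencode_spec : Claim_equal_featencode := by
  intro feats _
  show featencode feats = featencode_alt feats
  unfold featencode featencode_alt
  have h := foldA_zenc feats [] 0 (by omega)
  simp only [Nat.cast_zero] at h
  rw [h, zenc_encodeRuns feats 0 (by omega)]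
  simp
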